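-- pv_equiv track=rewrite | github.com/GoldenMine0502/AlgorithmPython | p19848.py | minOperationsToMakeEmpty
-- ===== SOURCE A (Python) =====
-- def minOperationsToMakeEmpty(S):
--     count = 0
--     stack = []
--
--     for char in S:
--         if stack and char != stack[-1]:
--             stack.pop()
--             count += 2
--         else:
--             stack.append(char)
--
--     return count
-- ===== SOURCE B (Python) =====
-- def minOperationsToMakeEmpty(S):
--     # Stage 1: run-length encode S into maximal runs of equal characters.
--     runs = []
--     i = 0
--     n = len(S)
--     while i < n:
--         j = i
--         while j < n and S[j] == S[i]:
--             j += 1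
--         runs.append((S[i], j - i))
--         i = j
--     # Stage 2: fold per-run arithmetic: a whole run of a differing character
--     # cancels min(k, depth) stacked characters at once; the answer is the
--     # number of cancelled + pushed characters, i.e. len(S) - final depth.
--     depth = 0
--     top = None
--     for ch, k in runs:
--         if depth == 0 or ch == top:
--             top = ch
--             depth += k
--         elif k <= depth:
--             depth -= k
--         else:
--             depth = k - depth
--             top = ch
--     return len(S) - depth
-- ===== Notes on version B (the rewrite author's own statement) =====
-- stated objective: alternative
-- what changed: Replaces the per-character stack push/pop with an in-loop counter by a two-stage algorithm: run-length encode S, then fold per-run arithmetic that cancels min(k, depth) characters of each run at once, returning len(S) - final depth.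
import Mathlib
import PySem

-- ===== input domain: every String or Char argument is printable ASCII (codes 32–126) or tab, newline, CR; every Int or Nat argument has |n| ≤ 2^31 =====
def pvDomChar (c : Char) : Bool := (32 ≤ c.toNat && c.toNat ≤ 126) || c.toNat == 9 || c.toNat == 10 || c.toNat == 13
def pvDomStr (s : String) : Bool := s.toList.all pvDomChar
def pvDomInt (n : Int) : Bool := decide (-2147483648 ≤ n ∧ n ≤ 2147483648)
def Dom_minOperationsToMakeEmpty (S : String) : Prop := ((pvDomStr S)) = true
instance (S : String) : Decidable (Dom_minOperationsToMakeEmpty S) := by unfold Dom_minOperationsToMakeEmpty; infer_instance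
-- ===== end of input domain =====

-- B run-length encodes S and folds per-run arithmetic (a run cancels min(k, depth)
-- stacked characters at once), returning len(S) - final depth, instead of A's
-- per-character stack push/pop with an in-loop counter (objective: alternative).


-- ===== PORT A =====
-- state = (count, stack); stack[-1] read via getLast? (only consulted when stack ≠ [])
def pvAStep (st : Int × List Char) (c : Char) : Int × List Char :=
  if st.2 ≠ [] ∧ some c ≠ st.2.getLast? then (st.1 + 2, st.2.dropLast)
  else (st.1, st.2 ++ [c])

def minOperationsToMakeEmpty (S : String) : Int :=
  (S.toList.foldl pvAStep (0, [])).1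

-- ===== PORT B =====
-- Stage 1 of Source B: run-length encoding (the inner while-scan of one run is the
-- takeWhile/dropWhile split of the leading run).
def pvRuns : List Char → List (Char × Nat)
  | [] => []
  | c :: t =>
    (c, (t.takeWhile (fun x => x == c)).length + 1) :: pvRuns (t.dropWhile (fun x => x == c))
termination_by l => l.length
decreasing_by
  simp only [List.length_cons]
  exact Nat.lt_succ_of_le (List.length_dropWhile_le _ _)

-- Stage 2 of Source B: per-run arithmetic; top starts as None, read only when depth > 0
def pvRunStep (st : Int × Option Char) (r : Char × Nat) : Int × Option Char :=
  if st.1 = 0 ∨ some r.1 = st.2 then (st.1 + r.2, some r.1)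
  else if (r.2 : Int) ≤ st.1 then (st.1 - r.2, st.2)
  else ((r.2 : Int) - st.1, some r.1)

def minOperationsToMakeEmpty_alt (S : String) : Int :=
  PySem.Str.len S - ((pvRuns S.toList).foldl pvRunStep (0, none)).1

-- ===== PRECONDITION & SPEC =====
def Spec_minOperationsToMakeEmpty (S : String) (out : Int) : Prop := out = minOperationsToMakeEmpty_alt S
instance (S : String) (out : Int) : Decidable (Spec_minOperationsToMakeEmpty S out) := by unfold Spec_minOperationsToMakeEmpty; infer_instance

-- ===== CLAIM (what is proved, stated in full; the proofs are below) =====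
def Claim_equal_minOperationsToMakeEmpty : Prop := ∀ (S : String), Dom_minOperationsToMakeEmpty S → Spec_minOperationsToMakeEmpty S (minOperationsToMakeEmpty S)

-- ===== LEMMAS AND PROOFS =====

-- Proof-side per-character depth automaton (the ghost intermediate between the two
-- programs: one char pushed or cancelled at a time).
def pvBStep (st : Int × Option Char) (c : Char) : Int × Option Char :=
  if st.1 > 0 ∧ some c ≠ st.2 then (st.1 - 1, st.2)
  else (st.1 + 1, some c)

-- Invariant: A's stack holds only copies of the ghost top character; under it, A's
-- final count equals count + |stack| + |l| minus the ghost automaton's final depth.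
lemma pv_key : ∀ (l : List Char) (count : Int) (stack : List Char) (topo : Option Char),
    (∀ x ∈ stack, topo = some x) →
    (l.foldl pvAStep (count, stack)).1 =
      count + (stack.length : Int) + (l.length : Int) - (l.foldl pvBStep ((stack.length : Int), topo)).1 := by
  intro l
  induction l with
  | nil => intro count stack topo _; simp
  | cons c t ih =>
    intro count stack topo h
    by_cases hs : stack = []
    · subst hs
      simp only [List.foldl_cons, pvAStep, pvBStep]
      simp only [ne_eq, not_true_eq_false, false_and, if_false, List.length_nil,
        Int.natCast_zero, lt_irrefl, List.nil_append, zero_add]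
      have := ih count [c] (some c) (by intro x hx; simp at hx; simp [hx])
      simp only [List.length_cons, List.length_nil] at this
      rw [this]
      simp only [List.length_cons]
      push_cast
      ring
    · have hlast : ∃ c0, stack.getLast? = some c0 ∧ topo = some c0 := by
        rcases List.exists_mem_of_ne_nil stack hs with ⟨y, _⟩
        have hg : stack.getLast (by exact hs) ∈ stack := List.getLast_mem hs
        exact ⟨stack.getLast hs, List.getLast?_eq_some_getLast hs ▸ rfl, h _ hg⟩
      rcases hlast with ⟨c0, hg, ht⟩
      by_cases hc : c = c0
      · subst hc
        simp only [List.foldl_cons, pvAStep, pvBStep]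
        rw [hg, ht]
        simp only [ne_eq, hs, not_false_iff, not_true_eq_false, and_false, if_false]
        have hall : ∀ x ∈ stack ++ [c], (some c : Option Char) = some x := by
          intro x hx
          rcases List.mem_append.mp hx with hx | hx
          · exact ht ▸ h x hx
          · simp at hx; simp [hx]
        have := ih count (stack ++ [c]) (some c) hall
        have hl : (((stack ++ [c]).length : Nat) : Int) = 1 + (stack.length : Int) := by
          simp [List.length_append]; ring
        rw [hl] at this
        rw [this]
        simp only [List.length_cons]
        push_cast
        ring
      · simp only [List.foldl_cons, pvAStep, pvBStep]
        rw [hg, ht]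
        have hne : (some c : Option Char) ≠ some c0 := by simp [hc]
        have hlen : 0 < (stack.length : Int) := by
          have : 0 < stack.length := List.length_pos_of_ne_nil hs
          exact_mod_cast this
        simp only [ne_eq, hs, not_false_iff, hne, hlen, and_true, if_pos]
        have hall : ∀ x ∈ stack.dropLast, (some c0 : Option Char) = some x := by
          intro x hx
          exact ht ▸ h x (List.dropLast_subset _ hx)
        have := ih (count + 2) stack.dropLast (some c0) hall
        have hdl : (stack.dropLast.length : Int) = (stack.length : Int) - 1 := by
          rw [List.length_dropLast]
          omega
        rw [hdl] at this
        rw [this]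
        simp only [List.length_cons]
        push_cast
        ring

-- A run of m equal characters pushed onto a matching ghost top.
lemma pv_push_run : ∀ (m : Nat) (d : Int) (c : Char), 0 ≤ d →
    (List.replicate m c).foldl pvBStep (d, some c) = (d + m, some c) := by
  intro m
  induction m with
  | zero => intro d c _; simp
  | succ k ih =>
    intro d c hd
    rw [List.replicate_succ, List.foldl_cons]
    have hstep : pvBStep (d, some c) c = (d + 1, some c) := by
      simp [pvBStep]
    rw [hstep, ih (d + 1) c (by omega)]
    simp only [Prod.mk.injEq, and_true]
    push_cast; omega

-- A run of m characters differing from the ghost top: cancels min(m, d).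
lemma pv_pop_run : ∀ (m : Nat) (d : Int) (c : Char) (t0 : Option Char),
    some c ≠ t0 → 0 ≤ d →
    (List.replicate m c).foldl pvBStep (d, t0) =
      if (m : Int) ≤ d then (d - m, t0) else ((m : Int) - d, some c) := by
  intro m
  induction m with
  | zero =>
    intro d c t0 _ hd
    simp only [List.replicate_zero, List.foldl_nil, Int.natCast_zero]
    rw [if_pos hd]
    simp
  | succ k ih =>
    intro d c t0 hne hd
    by_cases hpos : d > 0
    · rw [List.replicate_succ, List.foldl_cons]
      have hstep : pvBStep (d, t0) c = (d - 1, t0) := by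
        simp only [pvBStep]
        rw [if_pos ⟨hpos, hne⟩]
      rw [hstep, ih (d - 1) c t0 hne (by omega)]
      by_cases h2 : ((k + 1 : Nat) : Int) ≤ d
      · rw [if_pos (by push_cast at h2 ⊢; omega), if_pos h2]
        simp only [Prod.mk.injEq, and_true]
        push_cast; omega
      · rw [if_neg (by push_cast at h2 ⊢; omega), if_neg h2]
        simp only [Prod.mk.injEq, and_true]
        push_cast; omega
    · have hd0 : d = 0 := by omega
      subst hd0
      rw [List.replicate_succ, List.foldl_cons]
      have hstep : pvBStep (0, t0) c = (1, some c) := by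
        simp [pvBStep]
      rw [hstep, pv_push_run k 1 c (by omega)]
      rw [if_neg (by push_cast; omega)]
      simp only [Prod.mk.injEq, and_true]
      push_cast; omega

-- takeWhile (== c) is a replicate of c's.
lemma pv_takeWhile_replicate (t : List Char) (c : Char) :
    t.takeWhile (fun x => x == c) = List.replicate (t.takeWhile (fun x => x == c)).length c := by
  apply List.eq_replicate_of_mem
  intro x hx
  have := List.mem_takeWhile_imp hx
  simpa using this

-- The run fold computes the same final state as the per-character ghost automaton.
lemma pv_run_fold : ∀ (l : List Char) (d : Int) (topo : Option Char), 0 ≤ d →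
    (d = 0 ∨ ∃ c0, topo = some c0) →
    (pvRuns l).foldl pvRunStep (d, topo) = l.foldl pvBStep (d, topo) := by
  intro l
  induction l using pvRuns.induct with
  | case1 => intro d topo _ _; rw [pvRuns]; simp
  | case2 c t ih =>
    intro d topo hd htop
    rw [pvRuns, List.foldl_cons]
    have htw := pv_takeWhile_replicate t c
    have hsplit : c :: t =
        List.replicate ((t.takeWhile (fun x => x == c)).length + 1) c ++
          t.dropWhile (fun x => x == c) := by
      rw [List.replicate_succ, List.cons_append, ← htw, List.takeWhile_append_dropWhile]
    conv_rhs => rw [hsplit]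
    rw [List.foldl_append]
    by_cases hb : d = 0 ∨ some c = topo
    · have hrs : pvRunStep (d, topo) (c, (t.takeWhile (fun x => x == c)).length + 1) =
          (d + (((t.takeWhile (fun x => x == c)).length + 1 : Nat) : Int), some c) := by
        simp only [pvRunStep]
        rw [if_pos hb]
      have hfold : (List.replicate ((t.takeWhile (fun x => x == c)).length + 1) c).foldl
            pvBStep (d, topo) =
          (d + (((t.takeWhile (fun x => x == c)).length + 1 : Nat) : Int), some c) := by
        rcases hb with hb | hb
        · subst hb
          rw [List.replicate_succ, List.foldl_cons]
          have hstep : pvBStep (0, topo) c = (1, some c) := by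
            simp [pvBStep]
          rw [hstep, pv_push_run _ 1 c (by omega)]
          simp only [Prod.mk.injEq, and_true]
          push_cast; omega
        · rw [← hb]
          exact pv_push_run _ d c hd
      rw [hrs, hfold]
      exact ih _ (some c) (by positivity) (Or.inr ⟨c, rfl⟩)
    · push_neg at hb
      have hrs : pvRunStep (d, topo) (c, (t.takeWhile (fun x => x == c)).length + 1) =
          if (((t.takeWhile (fun x => x == c)).length + 1 : Nat) : Int) ≤ d
          then (d - (((t.takeWhile (fun x => x == c)).length + 1 : Nat) : Int), topo)
          else ((((t.takeWhile (fun x => x == c)).length + 1 : Nat) : Int) - d, some c) := by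
        simp only [pvRunStep]
        rw [if_neg (by push_neg; exact hb)]
      rw [hrs, pv_pop_run _ d c topo hb.2 hd]
      by_cases hle : (((t.takeWhile (fun x => x == c)).length + 1 : Nat) : Int) ≤ d
      · rw [if_pos hle]
        exact ih _ topo (by omega) (Or.inr (htop.resolve_left hb.1))
      · rw [if_neg hle]
        exact ih _ (some c) (by omega) (Or.inr ⟨c, rfl⟩)

-- ===== VERDICT (by name: the statement is the Claim_ definition above) =====
theorem minOperationsToMakeEmpty_spec : Claim_equal_minOperationsToMakeEmpty := by
  intro S _
  unfold Spec_minOperationsToMakeEmpty minOperationsToMakeEmpty minOperationsToMakeEmpty_alt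
  rw [pv_run_fold S.toList 0 none le_rfl (Or.inl rfl)]
  have := pv_key S.toList 0 [] none (by intro x hx; simp at hx)
  simp only [List.length_nil, Int.natCast_zero] at this
  rw [this, PySem.Str.len]
  simp
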